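-- pv_equiv track=rewrite | github.com/Ajay456780007/All_models | 8.py | build_kmer_vocab
-- ===== SOURCE A (Python) =====
-- def get_kmers(sequence, k=3):
--     # Extract all k-mers as strings
--     return [str(sequence[i:i+k]) for i in range(len(sequence) - k + 1)]
--
-- def build_kmer_vocab(sequences, k=3):
--     vocab = {}
--     idx = 1  # Start at 1, reserve 0 for k-mers with 'N'
--     for seq in sequences:
--         kmers = get_kmers(seq, k)
--         for kmer in kmers:
--             if 'N' in kmer:
--                 # skip adding k-mers containing 'N' to vocab
--                 continue
--             if kmer not in vocab:
--                 vocab[kmer] = idx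
--                 idx += 1
--     return vocab
-- ===== SOURCE B (Python) =====
-- def get_kmers(sequence, k=3):
--     # Extract all k-mers as strings
--     return [str(sequence[i:i+k]) for i in range(len(sequence) - k + 1)]
--
-- def build_kmer_vocab(sequences, k=3):
--     # Sort-based ranking: gather the stream of valid k-mers, then rank the DISTINCT
--     # k-mers by the position of their first occurrence (stream.index) and number them
--     # from 1. First-occurrence positions are unique per distinct k-mer, so the sort
--     # order is deterministic regardless of set iteration order.
--     stream = [km for seq in sequences for km in get_kmers(seq, k) if 'N' not in km]
--     distinct = sorted(set(stream), key=stream.index)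
--     return {km: i for i, km in enumerate(distinct, 1)}
-- ===== Notes on version B (the rewrite author's own statement) =====
-- stated objective: alternative
-- what changed: A numbers k-mers in a single pass with a running counter and an inline dict-membership test; B instead materialises the stream of valid k-mers, takes its set, SORTS the distinct k-mers by first-occurrence position (stream.index) and numbers the sorted list from 1 - a sort-based ranking instead of an incremental counter.
import Mathlib
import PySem

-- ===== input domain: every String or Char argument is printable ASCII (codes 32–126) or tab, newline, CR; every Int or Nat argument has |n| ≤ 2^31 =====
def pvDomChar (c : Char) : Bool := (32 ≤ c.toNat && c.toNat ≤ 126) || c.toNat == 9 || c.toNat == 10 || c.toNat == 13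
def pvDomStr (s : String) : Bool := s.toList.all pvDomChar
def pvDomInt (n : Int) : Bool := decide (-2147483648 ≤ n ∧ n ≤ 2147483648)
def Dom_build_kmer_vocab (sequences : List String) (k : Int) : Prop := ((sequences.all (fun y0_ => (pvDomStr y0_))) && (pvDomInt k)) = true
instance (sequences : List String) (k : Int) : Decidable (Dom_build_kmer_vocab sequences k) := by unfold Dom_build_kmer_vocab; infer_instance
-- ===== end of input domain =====

-- B replaces A's running-counter single pass by sort-based ranking: sort the set of valid k-mers by first-occurrence position, then number from 1 (objective: alternative).

-- ===== PORT A =====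
-- shared helper (identical in A and in B, as in the two Pythons)
def get_kmers (sequence : String) (k : Int) : List String :=
  (PySem.List.pyRange 0 (PySem.Str.len sequence - k + 1) 1).map
    (fun i => PySem.Str.slice sequence (some i) (some (i + k)))

-- A's inner loop body, named so the proofs can speak about it
def pvStepA (st : PySem.Dict String Int × Int) (kmer : String) : PySem.Dict String Int × Int :=
  if PySem.Str.isIn "N" kmer then st
  else if st.1.contains kmer then st
  else (st.1.insert kmer st.2, st.2 + 1)

def build_kmer_vocab (sequences : List String) (k : Int) : List (String × Int) :=
  let st := sequences.foldl
    (fun st seq => (get_kmers seq k).foldl pvStepA st)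
    (PySem.Dict.empty, (1 : Int))
  st.1.items

-- ===== PORT B =====
def build_kmer_vocab_alt (sequences : List String) (k : Int) : List (String × Int) :=
  let stream := sequences.flatMap
    (fun seq => (get_kmers seq k).filter (fun kmer => !(PySem.Str.isIn "N" kmer)))
  -- stream.index(km) is PySem.List.index?; it is `some` for every element of set(stream),
  -- so `.getD 0` is exact here
  let distinct := PySem.List.sorted (PySem.Set.ofList stream)
    (fun km => (PySem.List.index? stream km).getD 0) false
  (PySem.List.enumerate distinct 1).map (fun p => (p.2, p.1))

-- ===== PRECONDITION & SPEC =====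
def Spec_build_kmer_vocab (sequences : List String) (k : Int) (out : List (String × Int)) : Prop := out = build_kmer_vocab_alt sequences k
instance (sequences : List String) (k : Int) (out : List (String × Int)) : Decidable (Spec_build_kmer_vocab sequences k out) := by unfold Spec_build_kmer_vocab; infer_instance

-- ===== CLAIM (what is proved, stated in full; the proofs are below) =====
def Claim_equal_build_kmer_vocab : Prop := ∀ (sequences : List String) (k : Int), Dom_build_kmer_vocab sequences k → Spec_build_kmer_vocab sequences k (build_kmer_vocab sequences k)

-- ===== LEMMAS AND PROOFS =====

-- proof-only helpers: the first-occurrence list p determines A's loop state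
def pvNumbered (p : List String) : List (String × Int) :=
  (PySem.List.enumerate p 1).map (fun q => (q.2, q.1))

def pvState (p : List String) : PySem.Dict String Int × Int :=
  (PySem.Dict.mk (pvNumbered p), 1 + (p.length : Int))

theorem pvNumbered_append (p : List String) (km : String) :
    pvNumbered (p ++ [km]) = pvNumbered p ++ [(km, 1 + (p.length : Int))] := by
  simp [pvNumbered, PySem.List.enumerate_append, PySem.List.enumerate]

theorem contains_pvNumbered (p : List String) (km : String) :
    (PySem.Dict.mk (pvNumbered p)).contains km = true ↔ km ∈ p := by
  rw [PySem.Dict.contains_iff_mem_keys]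
  have : (PySem.Dict.mk (pvNumbered p)).keys = p := by
    simp [PySem.Dict.keys, pvNumbered, List.map_map, Function.comp_def,
      PySem.List.map_snd_enumerate]
  rw [this]

theorem pvStepA_state (p : List String) (km : String) :
    pvStepA (pvState p) km =
      pvState (if PySem.Str.isIn "N" km then p else PySem.Set.add p km) := by
  by_cases hN : PySem.Chars.isIn ['N'] km.toList = true
  · simp [pvStepA, hN]
  · have hN' : PySem.Str.isIn "N" km = false := by
      simp only [PySem.Str.isIn_eq]
      exact Bool.eq_false_iff.mpr (by simpa using hN)
    by_cases hm : km ∈ p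
    · have hc : (PySem.Dict.mk (pvNumbered p)).contains km = true :=
        (contains_pvNumbered p km).mpr hm
      simp [pvStepA, pvState, hc, PySem.Set.add, PySem.Set.contains, hm]
    · have hc : (PySem.Dict.mk (pvNumbered p)).contains km = false := by
        rw [Bool.eq_false_iff]
        intro h; exact hm ((contains_pvNumbered p km).mp h)
      have hins : (PySem.Dict.mk (pvNumbered p)).insert km (1 + (p.length : Int)) =
          PySem.Dict.mk (pvNumbered (p ++ [km])) := by
        simp [PySem.Dict.insert, hc, pvNumbered_append]
      have hadd : PySem.Set.add p km = p ++ [km] := by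
        simp [PySem.Set.add, PySem.Set.contains, hm]
      simp only [pvStepA, hN', Bool.false_eq_true, if_false, pvState, hc, hins, hadd]
      refine Prod.ext rfl ?_
      simp only [List.length_append, List.length_cons, List.length_nil]
      push_cast
      ring

theorem pvInner (ks p : List String) :
    ks.foldl pvStepA (pvState p) =
      pvState (PySem.Set.update p (ks.filter (fun kmer => !(PySem.Str.isIn "N" kmer)))) := by
  induction ks generalizing p with
  | nil => simp [PySem.Set.update]
  | cons km ks ih =>
    rw [List.foldl_cons, pvStepA_state]
    by_cases hN : PySem.Chars.isIn ['N'] km.toList = true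
    · simp [hN, ih]
    · simp [hN, ih]

theorem pvOuter (k : Int) (seqs p : List String) :
    seqs.foldl (fun st seq => (get_kmers seq k).foldl pvStepA st) (pvState p) =
      pvState (PySem.Set.update p
        (seqs.flatMap (fun seq => (get_kmers seq k).filter (fun kmer => !(PySem.Str.isIn "N" kmer))))) := by
  induction seqs generalizing p with
  | nil => simp [PySem.Set.update]
  | cons s seqs ih =>
    rw [List.foldl_cons, pvInner, ih, List.flatMap_cons]
    rw [PySem.Set.update, PySem.Set.update, PySem.Set.update, List.foldl_append]

-- B-side: the distinct k-mers of the stream come out of Set.ofList already strictly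
-- increasing in first-occurrence position, so Python's sort leaves them in place.
theorem pvPairwise_index_ofList {α : Type} [DecidableEq α] (l : List α) :
    (PySem.Set.ofList l).Pairwise
      (fun a b => (PySem.List.index? l a).getD 0 < (PySem.List.index? l b).getD 0) := by
  induction l using List.reverseRecOn with
  | nil => simp [PySem.Set.ofList]
  | append_singleton l x ih =>
    have hof : PySem.Set.ofList (l ++ [x]) = PySem.Set.add (PySem.Set.ofList l) x := by
      rw [PySem.Set.ofList_eq_foldl, PySem.Set.ofList_eq_foldl, List.foldl_append]
      rfl
    have hmem : ∀ a, a ∈ PySem.Set.ofList l → a ∈ l := fun a ha =>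
      (PySem.Set.mem_ofList l a).mp ha
    have hidx : ∀ a ∈ PySem.Set.ofList l,
        PySem.List.index? (l ++ [x]) a = PySem.List.index? l a := fun a ha =>
      PySem.List.index?_append_of_mem [x] (hmem a ha)
    by_cases hx : x ∈ l
    · have : PySem.Set.add (PySem.Set.ofList l) x = PySem.Set.ofList l := by
        simp [PySem.Set.add, PySem.Set.contains, PySem.Set.mem_ofList, hx]
      rw [hof, this]
      exact ih.imp_of_mem (fun {a b} ha hb h => by rw [hidx a ha, hidx b hb]; exact h)
    · have hxs : x ∉ PySem.Set.ofList l := fun h => hx (hmem x h)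
      have : PySem.Set.add (PySem.Set.ofList l) x = PySem.Set.ofList l ++ [x] := by
        simp [PySem.Set.add, PySem.Set.contains, hxs]
      rw [hof, this, List.pairwise_append]
      refine ⟨ih.imp_of_mem (fun {a b} ha hb h => by rw [hidx a ha, hidx b hb]; exact h),
        List.pairwise_singleton _ _, ?_⟩
      intro a ha b hb
      rw [List.mem_singleton] at hb
      subst hb
      rw [hidx a ha, PySem.List.index?_append_singleton_self l b hx]
      have hma : a ∈ l := hmem a ha
      obtain ⟨ka, hka⟩ := Option.isSome_iff_exists.mp
        ((PySem.List.index?_isSome_iff l a).mpr hma)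
      obtain ⟨pre, suf, hl, hlen, -⟩ := (PySem.List.index?_eq_some_iff l a ka).mp hka
      rw [hka]
      simp only [Option.getD_some]
      subst hlen
      have := congrArg List.length hl
      simp only [List.length_append, List.length_cons] at this
      omega

theorem pvSorted_ofList_index (l : List String) :
    PySem.List.sorted (PySem.Set.ofList l)
      (fun km => (PySem.List.index? l km).getD 0) false = PySem.Set.ofList l :=
  PySem.List.sorted_eq_of_perm_of_pairwise_lt _ _ _ (List.Perm.refl _) (pvPairwise_index_ofList l)

-- ===== VERDICT (by name: the statement is the Claim_ definition above) =====
theorem build_kmer_vocab_spec : Claim_equal_build_kmer_vocab := by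
  intro sequences k _
  show build_kmer_vocab sequences k = build_kmer_vocab_alt sequences k
  have h0 : (PySem.Dict.empty, (1 : Int)) = pvState [] := by
    simp [pvState, pvNumbered, PySem.List.enumerate, PySem.Dict.empty]
  rw [build_kmer_vocab, h0, pvOuter, PySem.Set.update_nil_left]
  rw [build_kmer_vocab_alt]
  simp only [pvSorted_ofList_index]
  simp [pvState, pvNumbered]
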